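-- pv_equiv track=rewrite | github.com/mathewbudnik/Core-Triage | src/triage.py | _keyword_affirmed
-- ===== SOURCE A (Python) =====
-- _NEG_WORDS = frozenset({
--     "no", "not", "without", "denies", "none", "negative", "absent", "deny", "never",
--     "didn't", "doesn't", "don't", "wasn't", "weren't", "isn't", "aren't",
--     "won't", "wouldn't", "can't", "couldn't", "shouldn't",
--     "hadn't", "hasn't", "haven't",
-- })
--
-- def _keyword_affirmed(text: str, keywords: list) -> bool:
--     """True only when a keyword appears without a negation in the four preceding words.
--
--     Supports both single-token and multi-word keywords. For multi-word keywords
--     (e.g. "tendon lifting"), the keyword's first token is searched against each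
--     word in the text, then the remaining tokens must appear contiguously after
--     it. The four-word negation window precedes the matched first token.
--
--     A four-word window handles 'no X or Y' patterns (e.g. 'no bladder or bowel issues').
--     False positives (over-flagging) are preferred over false negatives for safety flags."""
--     words = text.split()
--     for i, word in enumerate(words):
--         for kw in keywords:
--             kw_tokens = kw.split()
--             if len(kw_tokens) == 1:
--                 if kw_tokens[0] in word:
--                     context = words[max(0, i - 4):i]
--                     if not any(n in context for n in _NEG_WORDS):
--                         return True
--             else:
--                 if i + len(kw_tokens) > len(words):
--                     continue
--                 if kw_tokens[0] not in word:
--                     continue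
--                 # Allow trailing punctuation in subsequent tokens (e.g. "shortened,").
--                 tail = words[i + 1: i + len(kw_tokens)]
--                 if all(t in w for t, w in zip(kw_tokens[1:], tail)):
--                     context = words[max(0, i - 4):i]
--                     if not any(n in context for n in _NEG_WORDS):
--                         return True
--     return False
-- ===== SOURCE B (Python) =====
-- _NEG_WORDS = frozenset({
--     "no", "not", "without", "denies", "none", "negative", "absent", "deny", "never",
--     "didn't", "doesn't", "don't", "wasn't", "weren't", "isn't", "aren't",
--     "won't", "wouldn't", "can't", "couldn't", "shouldn't",
--     "hadn't", "hasn't", "haven't",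
-- })
--
--
-- def _keyword_affirmed(text: str, keywords: list) -> bool:
--     words = text.split()
--     n = len(words)
--     # Pass 1: sliding-window counter of negation words among the 4 preceding
--     # words; neg_before[i] is True iff the window before words[i] holds one.
--     neg_before = []
--     cnt = 0
--     for i, w in enumerate(words):
--         neg_before.append(cnt > 0)
--         if w in _NEG_WORDS:
--             cnt += 1
--         if i >= 4 and words[i - 4] in _NEG_WORDS:
--             cnt -= 1
--     # Pass 2: scan only un-negated positions for a keyword match.
--     token_lists = [kw.split() for kw in keywords]
--     for i in range(n):
--         if neg_before[i]:
--             continue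
--         for toks in token_lists:
--             if not toks or not (toks[0] in words[i]):
--                 continue
--             if len(toks) == 1:
--                 return True
--             if i + len(toks) <= n and all(
--                 t in words[i + 1 + j] for j, t in enumerate(toks[1:])
--             ):
--                 return True
--     return False
-- ===== Notes on version B (the rewrite author's own statement) =====
-- stated objective: alternative
-- what changed: B precomputes in one sliding-window-counter pass a per-position flag 'a negation word occurs in the 4 preceding words' and then scans only un-negated positions for a keyword match, instead of A's re-scanning the 4-word context slice against the whole negation set at every candidate match.
-- outside the precondition, e.g. on _keyword_affirmed('pain', ['pain', '']): A returns True, B returns True; on _keyword_affirmed('denies', ['']): A raises IndexError, B returns False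
import Mathlib
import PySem

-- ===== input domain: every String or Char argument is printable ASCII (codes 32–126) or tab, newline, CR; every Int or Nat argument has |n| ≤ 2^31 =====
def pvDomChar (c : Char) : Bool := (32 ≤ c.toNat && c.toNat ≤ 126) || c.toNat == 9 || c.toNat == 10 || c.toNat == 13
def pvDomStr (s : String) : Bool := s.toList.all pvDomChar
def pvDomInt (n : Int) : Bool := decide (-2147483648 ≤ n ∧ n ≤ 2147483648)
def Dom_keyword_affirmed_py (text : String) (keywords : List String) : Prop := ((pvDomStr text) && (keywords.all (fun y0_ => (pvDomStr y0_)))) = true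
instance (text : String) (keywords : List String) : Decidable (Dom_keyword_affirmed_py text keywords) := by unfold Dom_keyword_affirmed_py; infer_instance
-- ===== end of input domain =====

-- B replaces A's per-position negation-window rescan by a one-pass sliding-window
-- counter computed up front, then scans only un-negated positions (objective: alternative decomposition).

-- ===== PORT A =====
-- _NEG_WORDS (a frozenset of distinct literals; consumed only by order-independent `any`/membership)
def pyNEG : List String :=
  ["no", "not", "without", "denies", "none", "negative", "absent", "deny", "never",
   "didn't", "doesn't", "don't", "wasn't", "weren't", "isn't", "aren't",
   "won't", "wouldn't", "can't", "couldn't", "shouldn't",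
   "hadn't", "hasn't", "haven't"]

-- words[max(0, i - 4):i]  (i : Nat, so Nat subtraction is exactly max(0, i-4))
def kaContext (words : List String) (i : Nat) : List String :=
  (words.take i).drop (i - 4)

-- `any(n in context for n in _NEG_WORDS)`
def kaNegAny (words : List String) (i : Nat) : Bool :=
  pyNEG.any (fun n => (kaContext words i).contains n)

-- the body of A's inner `for kw in keywords` loop at position i, word = words[i]
def kaMatch (words : List String) (i : Nat) (word : String) (kw : String) : Bool :=
  let kw_tokens := PySem.Str.split₀ kw
  match kw_tokens with
  | [] => false   -- Python raises IndexError at kw_tokens[0]; excluded by Pre_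
  | t0 :: rest =>
    if rest.isEmpty then
      -- len(kw_tokens) == 1 branch
      PySem.Str.isIn t0 word && !(kaNegAny words i)
    else
      if i + kw_tokens.length > words.length then false
      else if !(PySem.Str.isIn t0 word) then false
      else
        -- tail = words[i + 1 : i + len(kw_tokens)]; all(t in w for t, w in zip(kw_tokens[1:], tail))
        let tail := (words.drop (i + 1)).take rest.length
        if (rest.zip tail).all (fun p => PySem.Str.isIn p.1 p.2) then
          !(kaNegAny words i)
        else false

-- `for i, word in enumerate(words): for kw in keywords: …return True… / return False`
def kaGo (words keywords : List String) : Nat → List String → Bool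
  | _, [] => false
  | i, word :: ws =>
    keywords.any (fun kw => kaMatch words i word kw) || kaGo words keywords (i + 1) ws

def keyword_affirmed_py (text : String) (keywords : List String) : Bool :=
  let words := PySem.Str.split₀ text
  kaGo words keywords 0 words

-- ===== PORT B =====
def kbIsNeg (w : String) : Bool := pyNEG.contains w

-- pass 1: sliding-window counter; element i is `cnt > 0` before consuming words[i]
def kbNegGo (words : List String) : Nat → Int → List String → List Bool
  | _, _, [] => []
  | i, cnt, w :: ws =>
    decide (cnt > 0) ::
      (let cnt1 := if kbIsNeg w then cnt + 1 else cnt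
       let cnt2 := if 4 ≤ i && kbIsNeg (words.getD (i - 4) "") then cnt1 - 1 else cnt1
       kbNegGo words (i + 1) cnt2 ws)

-- `all(t in words[i + 1 + j] for j, t in enumerate(toks[1:]))`: hand-ported counter loop
-- (index base + j is in range wherever the preceding `i + len(toks) <= n` guard holds)
def kbTail (words : List String) (base : Nat) : Nat → List String → Bool
  | _, [] => true
  | j, t :: ts => PySem.Str.isIn t (words.getD (base + j) "") && kbTail words base (j + 1) ts

-- body of B's inner `for toks in token_lists` loop
def kbMatch (words : List String) (n i : Nat) (toks : List String) : Bool :=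
  match toks with
  | [] => false   -- `if not toks … : continue`
  | t0 :: rest =>
    if !(PySem.Str.isIn t0 (words.getD i "")) then false
    else if rest.isEmpty then true
    else decide (i + toks.length ≤ n) && kbTail words (i + 1) 0 rest

def keyword_affirmed_py_alt (text : String) (keywords : List String) : Bool :=
  let words := PySem.Str.split₀ text
  let n := words.length
  let negBefore := kbNegGo words 0 0 words
  let tokenLists := keywords.map PySem.Str.split₀
  (List.range n).any (fun i =>
    !(negBefore.getD i false) && tokenLists.any (fun toks => kbMatch words n i toks))

-- ===== PRECONDITION & SPEC =====
-- Pre_ excludes inputs where the text has words and some keyword splits to no tokens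
-- (A reaches kw_tokens[0] on an empty token list and raises IndexError there, unless an
-- earlier keyword already returned True; those few returning inputs are excluded too).
def Pre_keyword_affirmed_py (text : String) (keywords : List String) : Prop :=
  PySem.Str.split₀ text = [] ∨ ∀ kw ∈ keywords, PySem.Str.split₀ kw ≠ []
instance (text : String) (keywords : List String) : Decidable (Pre_keyword_affirmed_py text keywords) := by
  unfold Pre_keyword_affirmed_py; infer_instance

def pvWitness_keyword_affirmed_py : String × List String := ("no back pain but tendon lifting hurts", ["tendon lifting", "pain"])

def Spec_keyword_affirmed_py (text : String) (keywords : List String) (out : Bool) : Prop := out = keyword_affirmed_py_alt text keywords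
instance (text : String) (keywords : List String) (out : Bool) : Decidable (Spec_keyword_affirmed_py text keywords out) := by unfold Spec_keyword_affirmed_py; infer_instance

-- ===== CLAIM (what is proved, stated in full; the proofs are below) =====
def Claim_equal_keyword_affirmed_py : Prop := ∀ (text : String) (keywords : List String), Dom_keyword_affirmed_py text keywords → Pre_keyword_affirmed_py text keywords → Spec_keyword_affirmed_py text keywords (keyword_affirmed_py text keywords)

-- ===== LEMMAS AND PROOFS =====

-- A's negation test over the set equals B's test over the context window
lemma negAny_swap (words : List String) (i : Nat) :
    kaNegAny words i = (kaContext words i).any kbIsNeg := by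
  rw [Bool.eq_iff_iff]
  unfold kaNegAny kbIsNeg
  simp only [List.any_eq_true, List.contains_iff_mem]
  exact ⟨fun ⟨n, h1, h2⟩ => ⟨n, h2, h1⟩, fun ⟨n, h1, h2⟩ => ⟨n, h2, h1⟩⟩

-- the exact count of negation words in the window before position i
def cntW (words : List String) (i : Nat) : Int :=
  ((kaContext words i).countP kbIsNeg : Int)

lemma cntW_succ (words : List String) (i : Nat) (h : i < words.length) :
    cntW words (i + 1) =
      (let cnt1 := if kbIsNeg words[i] then cntW words i + 1 else cntW words i
       if 4 ≤ i && kbIsNeg (words.getD (i - 4) "") then cnt1 - 1 else cnt1) := by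
  have hlen : (words.take i).length = i := by simp; omega
  have htake : words.take (i + 1) = words.take i ++ [words[i]] := by
    rw [List.take_succ, List.getElem?_eq_getElem h]; rfl
  by_cases h4 : 4 ≤ i
  · have hidx : i - 4 < words.length := by omega
    have hgd : words.getD (i - 4) "" = words[i - 4] := List.getD_eq_getElem _ _ hidx
    have hctx1 : kaContext words (i + 1) = (words.take i).drop (i - 3) ++ [words[i]] := by
      unfold kaContext
      have e1 : i + 1 - 4 = i - 3 := by omega
      rw [htake, e1, List.drop_append_of_le_length (by omega : i - 3 ≤ (words.take i).length)]
    have hsplit : kaContext words i = words[i - 4] :: (words.take i).drop (i - 3) := by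
      unfold kaContext
      rw [List.drop_eq_getElem_cons (by omega : i - 4 < (words.take i).length)]
      congr 1
      · simp [List.getElem_take]
      · congr 1; omega
    unfold cntW
    rw [hctx1, hsplit, hgd]
    simp only [List.countP_append, List.countP_cons, List.countP_nil, h4]
    cases hni : kbIsNeg words[i] <;> cases hn4 : kbIsNeg words[i - 4] <;>
      simp [hni, hn4] <;> push_cast <;> omega
  · have hctx1 : kaContext words (i + 1) = words.take i ++ [words[i]] := by
      unfold kaContext
      rw [htake]
      have e1 : i + 1 - 4 = 0 := by omega
      simp [e1]
    have hctx0 : kaContext words i = words.take i := by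
      unfold kaContext
      have e1 : i - 4 = 0 := by omega
      simp [e1]
    unfold cntW
    rw [hctx1, hctx0]
    simp only [List.countP_append, List.countP_cons, List.countP_nil, h4]
    cases hni : kbIsNeg words[i] <;> simp [hni, h4] <;> push_cast <;> omega

lemma cnt_pos_iff (c : List String) :
    decide ((c.countP kbIsNeg : Int) > 0) = c.any kbIsNeg := by
  rw [Bool.eq_iff_iff]
  simp [List.any_eq_true, List.countP_pos_iff]

lemma drop_lt (words rest : List String) (i : Nat) (hr : rest = words.drop i)
    (w : String) (ws : List String) (hc : rest = w :: ws) : i < words.length := by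
  by_contra hge
  rw [List.drop_eq_nil_of_le (by omega)] at hr
  rw [hc] at hr; cases hr

lemma kbNegGo_spec (words : List String) :
    ∀ (rest : List String) (i : Nat), rest = words.drop i →
    kbNegGo words i (cntW words i) rest =
      (List.range' i rest.length).map (fun j => (kaContext words j).any kbIsNeg) := by
  intro rest
  induction rest with
  | nil => intro i _; simp [kbNegGo]
  | cons w ws ih =>
    intro i hr
    have hi : i < words.length := drop_lt words (w :: ws) i hr w ws rfl
    have hcons : words.drop i = words[i] :: words.drop (i + 1) :=
      List.drop_eq_getElem_cons hi
    rw [hcons] at hr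
    obtain ⟨hw, hws⟩ : w = words[i] ∧ ws = words.drop (i + 1) := by
      constructor <;> [exact (List.cons.injEq .. ▸ hr).1; exact (List.cons.injEq .. ▸ hr).2]
    simp only [List.length_cons, List.range'_succ, List.map_cons]
    show (decide (cntW words i > 0)) ::
        (let cnt1 := if kbIsNeg w then cntW words i + 1 else cntW words i
         let cnt2 := if 4 ≤ i && kbIsNeg (words.getD (i - 4) "") then cnt1 - 1 else cnt1
         kbNegGo words (i + 1) cnt2 ws) = _
    congr 1
    · exact cnt_pos_iff (kaContext words i)
    · show kbNegGo words (i + 1)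
          (if 4 ≤ i && kbIsNeg (words.getD (i - 4) "") then
            (if kbIsNeg w then cntW words i + 1 else cntW words i) - 1
           else (if kbIsNeg w then cntW words i + 1 else cntW words i)) ws = _
      rw [hw]
      rw [← cntW_succ words i hi]
      exact ih (i + 1) hws

lemma kaGo_spec (words keywords : List String) :
    ∀ (rest : List String) (i : Nat), rest = words.drop i →
    kaGo words keywords i rest =
      (List.range' i rest.length).any
        (fun j => keywords.any (fun kw => kaMatch words j (words.getD j "") kw)) := by
  intro rest
  induction rest with
  | nil => intro i _; simp [kaGo]
  | cons w ws ih =>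
    intro i hr
    have hi : i < words.length := drop_lt words (w :: ws) i hr w ws rfl
    have hcons : words.drop i = words[i] :: words.drop (i + 1) :=
      List.drop_eq_getElem_cons hi
    rw [hcons] at hr
    obtain ⟨hw, hws⟩ : w = words[i] ∧ ws = words.drop (i + 1) := by
      constructor <;> [exact (List.cons.injEq .. ▸ hr).1; exact (List.cons.injEq .. ▸ hr).2]
    simp only [List.length_cons, List.range'_succ, List.any_cons]
    show ((keywords.any fun kw => kaMatch words i w kw) || kaGo words keywords (i + 1) ws) = _
    rw [hw, ih (i + 1) hws, ← List.getD_eq_getElem words "" hi]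

lemma kbTail_spec (words : List String) :
    ∀ (rest : List String) (base j : Nat), base + j + rest.length ≤ words.length →
    kbTail words base j rest =
      (rest.zip ((words.drop (base + j)).take rest.length)).all (fun p => PySem.Str.isIn p.1 p.2) := by
  intro rest
  induction rest with
  | nil => intro base j _; simp [kbTail]
  | cons t ts ih =>
    intro base j hle
    have hlt : base + j < words.length := by simp at hle; omega
    have hcons : words.drop (base + j) = words[base + j] :: words.drop (base + j + 1) :=
      List.drop_eq_getElem_cons hlt
    rw [hcons]
    simp only [List.length_cons, List.take_succ_cons, List.zip_cons_cons, List.all_cons]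
    show (PySem.Str.isIn t (words.getD (base + j) "") && kbTail words base (j + 1) ts) = _
    congr 1
    · rw [List.getD_eq_getElem words "" hlt]
    · have h1 : base + (j + 1) = base + j + 1 := by omega
      have := ih base (j + 1) (by simp at hle ⊢; omega)
      rw [h1] at this
      exact this

lemma match_eq (words : List String) (i : Nat) (kw : String) :
    kaMatch words i (words.getD i "") kw =
      (!(kaContext words i).any kbIsNeg && kbMatch words words.length i (PySem.Str.split₀ kw)) := by
  unfold kaMatch kbMatch
  rw [negAny_swap]
  cases hsp : PySem.Str.split₀ kw with
  | nil => simp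
  | cons t0 rest =>
    by_cases hre : rest = []
    · subst hre
      simp only [List.isEmpty_nil, if_true]
      cases hIn : PySem.Str.isIn t0 (words.getD i "") <;>
        cases hng : (kaContext words i).any kbIsNeg <;> simp [hIn, hng]
    · have hree : rest.isEmpty = false := by simpa [List.isEmpty_iff] using hre
      simp only [hree, Bool.false_eq_true, if_false]
      by_cases hb : i + (rest.length + 1) ≤ words.length
      · have hbn : ¬ (i + (t0 :: rest).length > words.length) := by
          simp only [List.length_cons, gt_iff_lt, not_lt]; omega
        have hd : decide (i + (t0 :: rest).length ≤ words.length) = true := by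
          simp only [List.length_cons, decide_eq_true_eq]; omega
        have htail : kbTail words (i + 1) 0 rest =
            (rest.zip ((words.drop (i + 1)).take rest.length)).all (fun p => PySem.Str.isIn p.1 p.2) := by
          have := kbTail_spec words rest (i + 1) 0 (by omega)
          simpa using this
        rw [if_neg hbn, hd, htail]
        cases hIn : PySem.Str.isIn t0 (words.getD i "") <;>
          cases hz : (rest.zip ((words.drop (i + 1)).take rest.length)).all (fun p => PySem.Str.isIn p.1 p.2) <;>
          cases hng : (kaContext words i).any kbIsNeg <;>
          simp [hIn, hz, hng]
      · have hbn : i + (t0 :: rest).length > words.length := by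
          simp only [List.length_cons, gt_iff_lt]; omega
        have hd : decide (i + (t0 :: rest).length ≤ words.length) = false := by
          simp only [List.length_cons, decide_eq_false_iff_not, not_le]; omega
        rw [if_pos hbn, hd]
        simp

lemma any_pull (c : Bool) (l : List String) (f : String → Bool) :
    l.any (fun kw => c && f kw) = (c && l.any f) := by
  cases c <;> simp

theorem keyword_affirmed_py_spec : Claim_equal_keyword_affirmed_py := by
  intro text keywords _ _
  unfold Spec_keyword_affirmed_py keyword_affirmed_py keyword_affirmed_py_alt
  simp only []
  rw [kaGo_spec (PySem.Str.split₀ text) keywords (PySem.Str.split₀ text) 0 (by simp)]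
  have h0 : (0 : Int) = cntW (PySem.Str.split₀ text) 0 := by simp [cntW, kaContext]
  rw [h0, kbNegGo_spec (PySem.Str.split₀ text) (PySem.Str.split₀ text) 0 (by simp)]
  rw [List.range_eq_range']
  apply PySem.List.any_congr_mem
  intro i hmem
  have hi : i < (PySem.Str.split₀ text).length := by
    have := List.mem_range'_1.mp hmem; omega
  have hgd : (((List.range' 0 (PySem.Str.split₀ text).length).map
      (fun j => (kaContext (PySem.Str.split₀ text) j).any kbIsNeg)).getD i false) =
      (kaContext (PySem.Str.split₀ text) i).any kbIsNeg := by
    rw [List.getD_eq_getElem _ _ (by simpa using hi)]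
    simp
  rw [hgd]
  rw [PySem.List.any_congr_mem (fun kw _ => match_eq (PySem.Str.split₀ text) i kw)]
  rw [any_pull]
  congr 1
  rw [List.any_map]
  rfl
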